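-- pv_equiv track=rewrite | github.com/nnalin04/AI-Powered-Novel-to-Video-Generator | ai_novel_to_video/services/voice_generator.py | _determine_style
-- ===== SOURCE A (Python) =====
-- def _determine_style(personality: list, emotional_tone: str) -> str:
--     """Determine voice style from personality traits and emotional tone."""
--     if not isinstance(personality, list):
--         personality = []
--
--     # Priority order for style selection
--     style_keywords = {
--         'soft': ['shy', 'gentle', 'soft', 'quiet', 'timid'],
--         'energetic': ['energetic', 'bold', 'excited', 'cheerful', 'lively'],
--         'calm': ['calm', 'peaceful', 'serene', 'wise', 'thoughtful'],
--         'dramatic': ['dramatic', 'villainous', 'dark', 'mysterious', 'intense'],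
--         'confident': ['confident', 'strong', 'brave', 'heroic'],
--         'wise': ['wise', 'sage', 'elder', 'knowledgeable'],
--         'gentle': ['gentle', 'kind', 'caring', 'nurturing']
--     }
--
--     # Check emotional tone first
--     for style, keywords in style_keywords.items():
--         if emotional_tone in keywords:
--             return style
--
--     # Check personality traits
--     for style, keywords in style_keywords.items():
--         if any(trait.lower() in keywords for trait in personality):
--             return style
--
--     return ''  # No specific style
-- ===== SOURCE B (Python) =====
-- def _determine_style(personality: list, emotional_tone: str) -> str:
--     """Determine voice style from personality traits and emotional tone."""
--     if not isinstance(personality, list):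
--         personality = []
--
--     order = ['soft', 'energetic', 'calm', 'dramatic', 'confident', 'wise', 'gentle']
--     keyword_lists = [
--         ['shy', 'gentle', 'soft', 'quiet', 'timid'],
--         ['energetic', 'bold', 'excited', 'cheerful', 'lively'],
--         ['calm', 'peaceful', 'serene', 'wise', 'thoughtful'],
--         ['dramatic', 'villainous', 'dark', 'mysterious', 'intense'],
--         ['confident', 'strong', 'brave', 'heroic'],
--         ['wise', 'sage', 'elder', 'knowledgeable'],
--         ['gentle', 'kind', 'caring', 'nurturing'],
--     ]
--
--     # Reverse index: keyword -> rank of the highest-priority style containing it.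
--     index = {}
--     for rank, keywords in enumerate(keyword_lists):
--         for k in keywords:
--             index.setdefault(k, rank)
--
--     # Emotional tone first (exact match, as given).
--     r = index.get(emotional_tone)
--     if r is not None:
--         return order[r]
--
--     # One pass over the traits keeping the best (smallest) rank seen.
--     best = len(order)
--     for trait in personality:
--         best = min(best, index.get(trait.lower(), len(order)))
--     return order[best] if best < len(order) else ''
-- ===== Notes on version B (the rewrite author's own statement) =====
-- stated objective: faster
-- what changed: A scans the 7-style table twice (a tone scan, then per-style any() re-scanning all traits); B precomputes a keyword-to-rank reverse index once, answers the tone by one dict lookup, and makes a single pass over the traits keeping the minimum rank.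
import Mathlib
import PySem

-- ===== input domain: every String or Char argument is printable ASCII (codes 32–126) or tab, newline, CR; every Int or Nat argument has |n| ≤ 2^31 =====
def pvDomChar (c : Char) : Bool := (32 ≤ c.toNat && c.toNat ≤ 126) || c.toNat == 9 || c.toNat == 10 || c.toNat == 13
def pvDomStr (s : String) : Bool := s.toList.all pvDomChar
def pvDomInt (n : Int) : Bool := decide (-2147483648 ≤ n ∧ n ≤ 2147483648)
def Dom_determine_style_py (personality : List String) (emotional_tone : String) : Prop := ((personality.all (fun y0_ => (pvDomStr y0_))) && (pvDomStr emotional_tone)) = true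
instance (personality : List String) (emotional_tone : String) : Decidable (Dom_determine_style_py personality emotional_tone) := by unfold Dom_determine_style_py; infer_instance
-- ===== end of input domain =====

-- B replaces A's two ordered scans of the style table by one precomputed keyword→rank
-- reverse index plus a single min-rank pass over the traits (objective: faster, measured).


-- ===== PORT A =====
def pvKw0 : List String := ["shy", "gentle", "soft", "quiet", "timid"]
def pvKw1 : List String := ["energetic", "bold", "excited", "cheerful", "lively"]
def pvKw2 : List String := ["calm", "peaceful", "serene", "wise", "thoughtful"]
def pvKw3 : List String := ["dramatic", "villainous", "dark", "mysterious", "intense"]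
def pvKw4 : List String := ["confident", "strong", "brave", "heroic"]
def pvKw5 : List String := ["wise", "sage", "elder", "knowledgeable"]
def pvKw6 : List String := ["gentle", "kind", "caring", "nurturing"]

-- the dict `style_keywords`, in insertion order
def pvTable : List (String × List String) :=
  [("soft", pvKw0), ("energetic", pvKw1), ("calm", pvKw2), ("dramatic", pvKw3),
   ("confident", pvKw4), ("wise", pvKw5), ("gentle", pvKw6)]

-- `for style, keywords in style_keywords.items(): if emotional_tone in keywords: return style`
def pvToneLoop : List (String × List String) → String → Option String
  | [], _ => none
  | (s, ks) :: rest, tone => if tone ∈ ks then some s else pvToneLoop rest tone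

-- `for style, keywords in style_keywords.items(): if any(trait.lower() in keywords for trait in personality): return style`
def pvTraitLoop : List (String × List String) → List String → Option String
  | [], _ => none
  | (s, ks) :: rest, p => if p.any (fun t => PySem.Str.lower t ∈ ks) then some s else pvTraitLoop rest p

-- `personality` is always a list here, so the isinstance guard never fires.
def determine_style_py (personality : List String) (emotional_tone : String) : String :=
  match pvToneLoop pvTable emotional_tone with
  | some s => s
  | none =>
    match pvTraitLoop pvTable personality with
    | some s => s
    | none => ""

-- ===== PORT B =====
def pvOrder : List String := ["soft", "energetic", "calm", "dramatic", "confident", "wise", "gentle"]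

def pvKwLists : List (List String) := [pvKw0, pvKw1, pvKw2, pvKw3, pvKw4, pvKw5, pvKw6]

-- `index = {}; for rank, keywords in enumerate(keyword_lists): for k in keywords: index.setdefault(k, rank)`
def pvIndex : PySem.Dict String Int :=
  (PySem.List.enumerate pvKwLists 0).foldl
    (fun d rk => rk.2.foldl (fun d k => PySem.Dict.setdefault d k rk.1) d)
    PySem.Dict.empty

-- `order[r]`: every rank stored in the index is 0..6, in range for `order` (pyGetD is exact there)
def determine_style_py_alt (personality : List String) (emotional_tone : String) : String :=
  match PySem.Dict.get? pvIndex emotional_tone with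
  | some r => PySem.List.pyGetD pvOrder r ""
  | none =>
    let best := personality.foldl
      (fun b t => min b (PySem.Dict.getD pvIndex (PySem.Str.lower t) 7)) 7
    if best < 7 then PySem.List.pyGetD pvOrder best "" else ""

-- ===== PRECONDITION & SPEC =====
def Spec_determine_style_py (personality : List String) (emotional_tone : String) (out : String) : Prop := out = determine_style_py_alt personality emotional_tone
instance (personality : List String) (emotional_tone : String) (out : String) : Decidable (Spec_determine_style_py personality emotional_tone out) := by unfold Spec_determine_style_py; infer_instance

-- ===== CLAIM (what is proved, stated in full; the proofs are below) =====
def Claim_equal_determine_style_py : Prop := ∀ (personality : List String) (emotional_tone : String), Dom_determine_style_py personality emotional_tone → Spec_determine_style_py personality emotional_tone (determine_style_py personality emotional_tone)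

-- ===== LEMMAS AND PROOFS =====

-- the rank (priority position) of the first style whose keyword list contains x; 7 = no style
def pvRank (x : String) : Int :=
  if x ∈ pvKw0 then 0 else if x ∈ pvKw1 then 1 else if x ∈ pvKw2 then 2
  else if x ∈ pvKw3 then 3 else if x ∈ pvKw4 then 4 else if x ∈ pvKw5 then 5
  else if x ∈ pvKw6 then 6 else 7

theorem pvIndex_get? (x : String) :
    PySem.Dict.get? pvIndex x = if pvRank x < 7 then some (pvRank x) else none := by
  by_cases hx : x ∈ pvKw0 ++ pvKw1 ++ pvKw2 ++ pvKw3 ++ pvKw4 ++ pvKw5 ++ pvKw6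
  · simp only [pvKw0, pvKw1, pvKw2, pvKw3, pvKw4, pvKw5, pvKw6, List.mem_append,
      List.mem_cons, List.not_mem_nil, or_false] at hx
    rcases hx with ((((((rfl|rfl|rfl|rfl|rfl)|(rfl|rfl|rfl|rfl|rfl))|(rfl|rfl|rfl|rfl|rfl))|
      (rfl|rfl|rfl|rfl|rfl))|(rfl|rfl|rfl|rfl))|(rfl|rfl|rfl|rfl))|(rfl|rfl|rfl|rfl) <;> decide
  · simp only [pvKw0, pvKw1, pvKw2, pvKw3, pvKw4, pvKw5, pvKw6, List.mem_append,
      List.mem_cons, List.not_mem_nil, or_false, not_or] at hx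
    obtain ⟨⟨⟨⟨⟨⟨h0, h1⟩, h2⟩, h3⟩, h4⟩, h5⟩, h6⟩ := hx
    have hr : pvRank x = 7 := by
      simp_all [pvRank, pvKw0, pvKw1, pvKw2, pvKw3, pvKw4, pvKw5, pvKw6]
    rw [hr]
    norm_num
    have hitems : pvIndex.items = [("shy", (0 : Int)), ("gentle", (0 : Int)), ("soft", (0 : Int)), ("quiet", (0 : Int)), ("timid", (0 : Int)), ("energetic", (1 : Int)), ("bold", (1 : Int)), ("excited", (1 : Int)), ("cheerful", (1 : Int)), ("lively", (1 : Int)), ("calm", (2 : Int)), ("peaceful", (2 : Int)), ("serene", (2 : Int)), ("wise", (2 : Int)), ("thoughtful", (2 : Int)), ("dramatic", (3 : Int)), ("villainous", (3 : Int)), ("dark", (3 : Int)), ("mysterious", (3 : Int)), ("intense", (3 : Int)), ("confident", (4 : Int)), ("strong", (4 : Int)), ("brave", (4 : Int)), ("heroic", (4 : Int)), ("sage", (5 : Int)), ("elder", (5 : Int)), ("knowledgeable", (5 : Int)), ("kind", (6 : Int)), ("caring", (6 : Int)), ("nurturing", (6 : Int))] := by decide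
    simp only [PySem.Dict.get?, hitems, Option.map_eq_none_iff, List.find?_eq_none]
    rintro ⟨k, v⟩ hkv
    simp only [beq_iff_eq]
    intro hk
    subst hk
    simp only [List.mem_cons, Prod.mk.injEq, List.not_mem_nil, or_false] at hkv
    simp_all

theorem pvIndex_getD (x : String) : PySem.Dict.getD pvIndex x 7 = pvRank x := by
  rw [PySem.Dict.getD, pvIndex_get?]
  split_ifs <;> simp [pvRank] at * <;> omega

theorem pvToneLoop_eq (x : String) :
    pvToneLoop pvTable x =
      if pvRank x < 7 then some (PySem.List.pyGetD pvOrder (pvRank x) "") else none := by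
  simp only [pvTable, pvToneLoop, pvRank]
  split_ifs <;> first | rfl | decide | omega

-- the minimum rank over the traits, as B's fold computes it (with pvRank in place of the index lookup)
def pvMi (p : List String) : Int :=
  p.foldl (fun b t => min b (pvRank (PySem.Str.lower t))) 7

theorem pvFoldl_min_general (f : String → Int) (p : List String) (a : Int) :
    p.foldl (fun b t => min b (f t)) a = a ∨
      ∃ t ∈ p, p.foldl (fun b t => min b (f t)) a = f t := by
  induction p generalizing a with
  | nil => left; rfl
  | cons h tl ih =>
    rcases ih (min a (f h)) with hc | ⟨t, ht, he⟩
    · rcases le_total a (f h) with hle | hle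
      · left; simpa [List.foldl_cons, min_eq_left hle] using hc
      · right; exact ⟨h, List.mem_cons_self, by simpa [List.foldl_cons, min_eq_right hle] using hc⟩
    · right; exact ⟨t, List.mem_cons_of_mem _ ht, he⟩

theorem pvFoldl_min_le_init (f : String → Int) (p : List String) (a : Int) :
    p.foldl (fun b t => min b (f t)) a ≤ a := by
  induction p generalizing a with
  | nil => simp
  | cons h tl ih => exact le_trans (ih (min a (f h))) (min_le_left _ _)

theorem pvFoldl_min_le (f : String → Int) (p : List String) (a : Int) (t : String) (ht : t ∈ p) :
    p.foldl (fun b t => min b (f t)) a ≤ f t := by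
  induction p generalizing a with
  | nil => simp at ht
  | cons h tl ih =>
    rcases List.mem_cons.mp ht with rfl | ht
    · exact le_trans (pvFoldl_min_le_init f tl (min a (f t))) (min_le_right _ _)
    · exact ih _ ht

theorem pvMi_eq (p : List String) (k : Int)
    (hup : ∃ t ∈ p, pvRank (PySem.Str.lower t) ≤ k)
    (hlo : ∀ t ∈ p, k ≤ pvRank (PySem.Str.lower t)) (hk : k ≤ 7) : pvMi p = k := by
  obtain ⟨t, ht, hle⟩ := hup
  have h1 : pvMi p ≤ k := le_trans (pvFoldl_min_le _ p 7 t ht) hle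
  have h2 : k ≤ pvMi p := by
    rcases pvFoldl_min_general (fun t => pvRank (PySem.Str.lower t)) p 7 with hc | ⟨u, hu, he⟩
    · rw [pvMi, hc]; exact hk
    · rw [pvMi, he]; exact hlo u hu
  omega

theorem pvMi_seven (p : List String) (hlo : ∀ t ∈ p, pvRank (PySem.Str.lower t) = 7) :
    pvMi p = 7 := by
  rcases pvFoldl_min_general (fun t => pvRank (PySem.Str.lower t)) p 7 with hc | ⟨u, hu, he⟩
  · rw [pvMi, hc]
  · rw [pvMi, he]; exact hlo u hu

theorem pvTraitLoop_eq (p : List String) :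
    pvTraitLoop pvTable p =
      if pvMi p < 7 then some (PySem.List.pyGetD pvOrder (pvMi p) "") else none := by
  simp only [pvTable, pvTraitLoop]
  by_cases c0 : (p.any fun t => decide (PySem.Str.lower t ∈ pvKw0)) = true
  · rw [if_pos c0]
    simp only [List.any_eq_true, decide_eq_true_eq] at c0
    have hm : pvMi p = 0 := by
      obtain ⟨t, ht, hmem⟩ := c0
      refine pvMi_eq p 0 ⟨t, ht, by unfold pvRank; split_ifs <;> first | omega | simp_all [pvKw0, pvKw1, pvKw2, pvKw3, pvKw4, pvKw5, pvKw6]⟩ (fun u hu => ?_) (by omega)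
      unfold pvRank; split_ifs <;> first | omega | simp_all [pvKw0, pvKw1, pvKw2, pvKw3, pvKw4, pvKw5, pvKw6]
    rw [hm]
    norm_num
    decide
  · rw [if_neg c0]
    by_cases c1 : (p.any fun t => decide (PySem.Str.lower t ∈ pvKw1)) = true
    · rw [if_pos c1]
      simp only [List.any_eq_true, decide_eq_true_eq] at c0 c1
      have hm : pvMi p = 1 := by
        obtain ⟨t, ht, hmem⟩ := c1
        refine pvMi_eq p 1 ⟨t, ht, by unfold pvRank; split_ifs <;> first | omega | simp_all [pvKw0, pvKw1, pvKw2, pvKw3, pvKw4, pvKw5, pvKw6]⟩ (fun u hu => ?_) (by omega)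
        have h0 : PySem.Str.lower u ∉ pvKw0 := fun hc => c0 ⟨u, hu, hc⟩
        unfold pvRank; split_ifs <;> first | omega | simp_all [pvKw0, pvKw1, pvKw2, pvKw3, pvKw4, pvKw5, pvKw6]
      rw [hm]
      norm_num
      decide
    · rw [if_neg c1]
      by_cases c2 : (p.any fun t => decide (PySem.Str.lower t ∈ pvKw2)) = true
      · rw [if_pos c2]
        simp only [List.any_eq_true, decide_eq_true_eq] at c0 c1 c2
        have hm : pvMi p = 2 := by
          obtain ⟨t, ht, hmem⟩ := c2
          refine pvMi_eq p 2 ⟨t, ht, by unfold pvRank; split_ifs <;> first | omega | simp_all [pvKw0, pvKw1, pvKw2, pvKw3, pvKw4, pvKw5, pvKw6]⟩ (fun u hu => ?_) (by omega)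
          have h0 : PySem.Str.lower u ∉ pvKw0 := fun hc => c0 ⟨u, hu, hc⟩
          have h1 : PySem.Str.lower u ∉ pvKw1 := fun hc => c1 ⟨u, hu, hc⟩
          unfold pvRank; split_ifs <;> first | omega | simp_all [pvKw0, pvKw1, pvKw2, pvKw3, pvKw4, pvKw5, pvKw6]
        rw [hm]
        norm_num
        decide
      · rw [if_neg c2]
        by_cases c3 : (p.any fun t => decide (PySem.Str.lower t ∈ pvKw3)) = true
        · rw [if_pos c3]
          simp only [List.any_eq_true, decide_eq_true_eq] at c0 c1 c2 c3
          have hm : pvMi p = 3 := by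
            obtain ⟨t, ht, hmem⟩ := c3
            refine pvMi_eq p 3 ⟨t, ht, by unfold pvRank; split_ifs <;> first | omega | simp_all [pvKw0, pvKw1, pvKw2, pvKw3, pvKw4, pvKw5, pvKw6]⟩ (fun u hu => ?_) (by omega)
            have h0 : PySem.Str.lower u ∉ pvKw0 := fun hc => c0 ⟨u, hu, hc⟩
            have h1 : PySem.Str.lower u ∉ pvKw1 := fun hc => c1 ⟨u, hu, hc⟩
            have h2 : PySem.Str.lower u ∉ pvKw2 := fun hc => c2 ⟨u, hu, hc⟩
            unfold pvRank; split_ifs <;> first | omega | simp_all [pvKw0, pvKw1, pvKw2, pvKw3, pvKw4, pvKw5, pvKw6]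
          rw [hm]
          norm_num
          decide
        · rw [if_neg c3]
          by_cases c4 : (p.any fun t => decide (PySem.Str.lower t ∈ pvKw4)) = true
          · rw [if_pos c4]
            simp only [List.any_eq_true, decide_eq_true_eq] at c0 c1 c2 c3 c4
            have hm : pvMi p = 4 := by
              obtain ⟨t, ht, hmem⟩ := c4
              refine pvMi_eq p 4 ⟨t, ht, by unfold pvRank; split_ifs <;> first | omega | simp_all [pvKw0, pvKw1, pvKw2, pvKw3, pvKw4, pvKw5, pvKw6]⟩ (fun u hu => ?_) (by omega)
              have h0 : PySem.Str.lower u ∉ pvKw0 := fun hc => c0 ⟨u, hu, hc⟩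
              have h1 : PySem.Str.lower u ∉ pvKw1 := fun hc => c1 ⟨u, hu, hc⟩
              have h2 : PySem.Str.lower u ∉ pvKw2 := fun hc => c2 ⟨u, hu, hc⟩
              have h3 : PySem.Str.lower u ∉ pvKw3 := fun hc => c3 ⟨u, hu, hc⟩
              unfold pvRank; split_ifs <;> first | omega | simp_all [pvKw0, pvKw1, pvKw2, pvKw3, pvKw4, pvKw5, pvKw6]
            rw [hm]
            norm_num
            decide
          · rw [if_neg c4]
            by_cases c5 : (p.any fun t => decide (PySem.Str.lower t ∈ pvKw5)) = true
            · rw [if_pos c5]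
              simp only [List.any_eq_true, decide_eq_true_eq] at c0 c1 c2 c3 c4 c5
              have hm : pvMi p = 5 := by
                obtain ⟨t, ht, hmem⟩ := c5
                refine pvMi_eq p 5 ⟨t, ht, by unfold pvRank; split_ifs <;> first | omega | simp_all [pvKw0, pvKw1, pvKw2, pvKw3, pvKw4, pvKw5, pvKw6]⟩ (fun u hu => ?_) (by omega)
                have h0 : PySem.Str.lower u ∉ pvKw0 := fun hc => c0 ⟨u, hu, hc⟩
                have h1 : PySem.Str.lower u ∉ pvKw1 := fun hc => c1 ⟨u, hu, hc⟩
                have h2 : PySem.Str.lower u ∉ pvKw2 := fun hc => c2 ⟨u, hu, hc⟩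
                have h3 : PySem.Str.lower u ∉ pvKw3 := fun hc => c3 ⟨u, hu, hc⟩
                have h4 : PySem.Str.lower u ∉ pvKw4 := fun hc => c4 ⟨u, hu, hc⟩
                unfold pvRank; split_ifs <;> first | omega | simp_all [pvKw0, pvKw1, pvKw2, pvKw3, pvKw4, pvKw5, pvKw6]
              rw [hm]
              norm_num
              decide
            · rw [if_neg c5]
              by_cases c6 : (p.any fun t => decide (PySem.Str.lower t ∈ pvKw6)) = true
              · rw [if_pos c6]
                simp only [List.any_eq_true, decide_eq_true_eq] at c0 c1 c2 c3 c4 c5 c6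
                have hm : pvMi p = 6 := by
                  obtain ⟨t, ht, hmem⟩ := c6
                  refine pvMi_eq p 6 ⟨t, ht, by unfold pvRank; split_ifs <;> first | omega | simp_all [pvKw0, pvKw1, pvKw2, pvKw3, pvKw4, pvKw5, pvKw6]⟩ (fun u hu => ?_) (by omega)
                  have h0 : PySem.Str.lower u ∉ pvKw0 := fun hc => c0 ⟨u, hu, hc⟩
                  have h1 : PySem.Str.lower u ∉ pvKw1 := fun hc => c1 ⟨u, hu, hc⟩
                  have h2 : PySem.Str.lower u ∉ pvKw2 := fun hc => c2 ⟨u, hu, hc⟩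
                  have h3 : PySem.Str.lower u ∉ pvKw3 := fun hc => c3 ⟨u, hu, hc⟩
                  have h4 : PySem.Str.lower u ∉ pvKw4 := fun hc => c4 ⟨u, hu, hc⟩
                  have h5 : PySem.Str.lower u ∉ pvKw5 := fun hc => c5 ⟨u, hu, hc⟩
                  unfold pvRank; split_ifs <;> first | omega | simp_all [pvKw0, pvKw1, pvKw2, pvKw3, pvKw4, pvKw5, pvKw6]
                rw [hm]
                norm_num
                decide
              · rw [if_neg c6]
                simp only [List.any_eq_true, decide_eq_true_eq] at c0 c1 c2 c3 c4 c5 c6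
                have hm : pvMi p = 7 := by
                  refine pvMi_seven p (fun u hu => ?_)
                  have h0 : PySem.Str.lower u ∉ pvKw0 := fun hc => c0 ⟨u, hu, hc⟩
                  have h1 : PySem.Str.lower u ∉ pvKw1 := fun hc => c1 ⟨u, hu, hc⟩
                  have h2 : PySem.Str.lower u ∉ pvKw2 := fun hc => c2 ⟨u, hu, hc⟩
                  have h3 : PySem.Str.lower u ∉ pvKw3 := fun hc => c3 ⟨u, hu, hc⟩
                  have h4 : PySem.Str.lower u ∉ pvKw4 := fun hc => c4 ⟨u, hu, hc⟩
                  have h5 : PySem.Str.lower u ∉ pvKw5 := fun hc => c5 ⟨u, hu, hc⟩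
                  have h6 : PySem.Str.lower u ∉ pvKw6 := fun hc => c6 ⟨u, hu, hc⟩
                  simp [pvRank, h0, h1, h2, h3, h4, h5, h6]
                rw [hm]
                norm_num

-- ===== VERDICT (by name: the statement is the Claim_ definition above) =====
theorem determine_style_py_spec : Claim_equal_determine_style_py := by
  intro p tone _
  unfold Spec_determine_style_py determine_style_py determine_style_py_alt
  rw [pvToneLoop_eq, pvIndex_get?]
  have hfold : p.foldl (fun b t => min b (PySem.Dict.getD pvIndex (PySem.Str.lower t) 7)) 7
      = pvMi p := by
    unfold pvMi
    simp only [pvIndex_getD]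
  by_cases hr : pvRank tone < 7
  · simp [hr]
  · simp only [hr, if_false]
    rw [pvTraitLoop_eq, hfold]
    by_cases hm : pvMi p < 7 <;> simp [hm]
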